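-- pv_equiv track=rewrite | github.com/HeWeMel/adventofcode | mylib/aoc_frame.py | wrap_add
-- ===== SOURCE A (Python) =====
-- def wrap_add(i, plus, high_limit, low_limit=0):
--     """ Add plus to i, stay within interval [low_limit, high_limit) by wrapping """
--     i += plus
--     if plus >= 0:
--         while i >= high_limit:
--             i -= (high_limit - low_limit)
--     else:
--         while i < low_limit:
--             i += (high_limit - low_limit)
--     return i
-- ===== SOURCE B (Python) =====
-- def wrap_add(i, plus, high_limit, low_limit=0):
--     """ Add plus to i, stay within interval [low_limit, high_limit) by wrapping """
--     width = high_limit - low_limit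
--     return low_limit + (i + plus - low_limit) % width
-- ===== Notes on version B (the rewrite author's own statement) =====
-- stated objective: simpler
-- what changed: Replaces the repeated add/subtract-width loop with a single closed-form floor-modulus expression low + (i+plus-low) % (high-low).
-- intended difference: When the starting index i already lies outside [low_limit, high_limit) on the side the loop never checks (plus >= 0 with i+plus < low_limit, or plus < 0 with i+plus >= high_limit), A returns i+plus unwrapped, outside the interval; B returns the properly wrapped value inside [low_limit, high_limit), which is what the docstring ('stay within interval') intends. — e.g. on wrap_add(0, 0, 3, 1): A returns 0, B returns 2
-- outside the precondition, e.g. on wrap_add(1, 1, 3, 10): A returns 2, B returns 9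
import Mathlib
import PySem

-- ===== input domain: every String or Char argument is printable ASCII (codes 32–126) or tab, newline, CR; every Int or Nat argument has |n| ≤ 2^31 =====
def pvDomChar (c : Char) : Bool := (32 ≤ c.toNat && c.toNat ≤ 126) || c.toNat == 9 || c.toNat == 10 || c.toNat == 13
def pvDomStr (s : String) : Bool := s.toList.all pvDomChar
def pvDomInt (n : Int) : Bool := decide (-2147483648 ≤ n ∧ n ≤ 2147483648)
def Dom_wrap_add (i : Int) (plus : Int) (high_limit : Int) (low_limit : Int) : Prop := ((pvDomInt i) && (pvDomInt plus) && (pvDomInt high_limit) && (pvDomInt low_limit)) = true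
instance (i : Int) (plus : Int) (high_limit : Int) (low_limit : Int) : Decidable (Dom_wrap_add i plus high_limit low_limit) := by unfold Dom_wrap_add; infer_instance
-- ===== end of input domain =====

-- B computes the wrap as the single modulus expression low + (i+plus-low) % (high-low) instead of A's repeated add/subtract loop (simpler).


-- ===== PORT A =====
-- 'while i >= high_limit: i -= (high_limit - low_limit)'; the 'low_limit < high_limit' guard
-- only makes the recursion total (Python diverges there; such inputs are outside Pre_).
def wrapDownLoop (high_limit low_limit i : Int) : Int :=
  if low_limit < high_limit ∧ high_limit ≤ i then
    wrapDownLoop high_limit low_limit (i - (high_limit - low_limit))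
  else i
termination_by (i - low_limit).toNat
decreasing_by omega

-- 'while i < low_limit: i += (high_limit - low_limit)'; same totality guard.
def wrapUpLoop (high_limit low_limit i : Int) : Int :=
  if low_limit < high_limit ∧ i < low_limit then
    wrapUpLoop high_limit low_limit (i + (high_limit - low_limit))
  else i
termination_by (low_limit - i).toNat
decreasing_by omega

def wrap_add (i : Int) (plus : Int) (high_limit : Int) (low_limit : Int) : Int :=
  let i := i + plus
  if plus ≥ 0 then wrapDownLoop high_limit low_limit i
  else wrapUpLoop high_limit low_limit i

-- ===== PORT B =====
def wrap_add_alt (i : Int) (plus : Int) (high_limit : Int) (low_limit : Int) : Int :=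
  let width := high_limit - low_limit
  low_limit + PySem.Int.mod (i + plus - low_limit) width

-- ===== PRECONDITION & SPEC =====
-- Pre_ excludes high_limit ≤ low_limit: there A's while-loop diverges whenever a wrap is
-- needed (and where it still returns, B's '% 0'/negative-width modulus is a different,
-- equally unspecified value); the interval [low, high) is the function's natural domain.
def Pre_wrap_add (i : Int) (plus : Int) (high_limit : Int) (low_limit : Int) : Prop :=
  low_limit < high_limit
instance (i : Int) (plus : Int) (high_limit : Int) (low_limit : Int) : Decidable (Pre_wrap_add i plus high_limit low_limit) := by unfold Pre_wrap_add; infer_instance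

def pvWitness_wrap_add : Int × Int × Int × Int := (1, 7, 5, 0)

-- On inputs whose start index i already lies outside [low_limit, high_limit) on the side the
-- loop never checks (plus ≥ 0 with i+plus < low_limit, or plus < 0 with i+plus ≥ high_limit),
-- A returns i+plus unwrapped, outside the interval; B returns the wrapped value inside
-- [low_limit, high_limit), which is what the docstring ('stay within interval') intends.
def D_wrap_add (i : Int) (plus : Int) (high_limit : Int) (low_limit : Int) : Prop :=
  (plus ≥ 0 ∧ i + plus < low_limit) ∨ (plus < 0 ∧ high_limit ≤ i + plus)
instance (i : Int) (plus : Int) (high_limit : Int) (low_limit : Int) : Decidable (D_wrap_add i plus high_limit low_limit) := by unfold D_wrap_add; infer_instance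

def Spec_wrap_add (i : Int) (plus : Int) (high_limit : Int) (low_limit : Int) (out : Int) : Prop := ¬ D_wrap_add i plus high_limit low_limit → out = wrap_add_alt i plus high_limit low_limit
instance (i : Int) (plus : Int) (high_limit : Int) (low_limit : Int) (out : Int) : Decidable (Spec_wrap_add i plus high_limit low_limit out) := by unfold Spec_wrap_add; infer_instance

def pvDiffWitness_wrap_add : Int × Int × Int × Int := (0, 0, 3, 1)
def pvDiffWitnessOut_wrap_add : Int × Int := (0, 2)

-- ===== CLAIM (what is proved, stated in full; the proofs are below) =====
def Claim_unchanged_wrap_add : Prop := ∀ (i : Int) (plus : Int) (high_limit : Int) (low_limit : Int), Dom_wrap_add i plus high_limit low_limit → Pre_wrap_add i plus high_limit low_limit → Spec_wrap_add i plus high_limit low_limit (wrap_add i plus high_limit low_limit)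
def Claim_changed_wrap_add : Prop := Dom_wrap_add (pvDiffWitness_wrap_add.1) (pvDiffWitness_wrap_add.2.1) (pvDiffWitness_wrap_add.2.2.1) (pvDiffWitness_wrap_add.2.2.2) ∧ Pre_wrap_add (pvDiffWitness_wrap_add.1) (pvDiffWitness_wrap_add.2.1) (pvDiffWitness_wrap_add.2.2.1) (pvDiffWitness_wrap_add.2.2.2) ∧ D_wrap_add (pvDiffWitness_wrap_add.1) (pvDiffWitness_wrap_add.2.1) (pvDiffWitness_wrap_add.2.2.1) (pvDiffWitness_wrap_add.2.2.2) ∧ wrap_add (pvDiffWitness_wrap_add.1) (pvDiffWitness_wrap_add.2.1) (pvDiffWitness_wrap_add.2.2.1) (pvDiffWitness_wrap_add.2.2.2) = pvDiffWitnessOut_wrap_add.1 ∧ wrap_add_alt (pvDiffWitness_wrap_add.1) (pvDiffWitness_wrap_add.2.1) (pvDiffWitness_wrap_add.2.2.1) (pvDiffWitness_wrap_add.2.2.2) = pvDiffWitnessOut_wrap_add.2 ∧ pvDiffWitnessOut_wrap_add.1 ≠ pvDiffWitnessOut_wrap_add.2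
def Claim_exact_wrap_add : Prop := ∀ (i : Int) (plus : Int) (high_limit : Int) (low_limit : Int), Dom_wrap_add i plus high_limit low_limit → Pre_wrap_add i plus high_limit low_limit → D_wrap_add i plus high_limit low_limit → wrap_add i plus high_limit low_limit ≠ wrap_add_alt i plus high_limit low_limit

-- ===== LEMMAS AND PROOFS =====

-- Both loops, started anywhere on the correct side, land on the unique representative
-- of i modulo the width inside [low_limit, high_limit).
theorem wrapDownLoop_eq (high_limit low_limit : Int) (hlt : low_limit < high_limit)
    (i : Int) (hi : low_limit ≤ i) :
    wrapDownLoop high_limit low_limit i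
      = low_limit + (i - low_limit) % (high_limit - low_limit) := by
  rw [wrapDownLoop]
  split_ifs with h
  · rw [wrapDownLoop_eq high_limit low_limit hlt _ (by omega),
      show i - (high_limit - low_limit) - low_limit
        = i - low_limit - (high_limit - low_limit) from by ring,
      Int.sub_emod_right]
  · have h1 : 0 ≤ i - low_limit := by omega
    have h2 : i - low_limit < high_limit - low_limit := by omega
    rw [Int.emod_eq_of_lt h1 h2]
    omega
termination_by (i - low_limit).toNat
decreasing_by omega

theorem wrapUpLoop_eq (high_limit low_limit : Int) (hlt : low_limit < high_limit)
    (i : Int) (hi : i < high_limit) :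
    wrapUpLoop high_limit low_limit i
      = low_limit + (i - low_limit) % (high_limit - low_limit) := by
  rw [wrapUpLoop]
  split_ifs with h
  · rw [wrapUpLoop_eq high_limit low_limit hlt _ (by omega),
      show i + (high_limit - low_limit) - low_limit
        = i - low_limit + (high_limit - low_limit) from by ring,
      Int.add_emod_right]
  · have h1 : 0 ≤ i - low_limit := by omega
    have h2 : i - low_limit < high_limit - low_limit := by omega
    rw [Int.emod_eq_of_lt h1 h2]
    omega
termination_by (low_limit - i).toNat
decreasing_by omega

theorem wrap_add_alt_emod (i plus high_limit low_limit : Int) (hlt : low_limit < high_limit) :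
    wrap_add_alt i plus high_limit low_limit
      = low_limit + (i + plus - low_limit) % (high_limit - low_limit) := by
  show low_limit + PySem.Int.mod (i + plus - low_limit) (high_limit - low_limit)
    = low_limit + (i + plus - low_limit) % (high_limit - low_limit)
  rw [PySem.Int.mod_eq_emod_of_pos (by omega)]

theorem wrap_add_alt_mem (i plus high_limit low_limit : Int) (hlt : low_limit < high_limit) :
    low_limit ≤ wrap_add_alt i plus high_limit low_limit ∧
      wrap_add_alt i plus high_limit low_limit < high_limit := by
  rw [wrap_add_alt_emod _ _ _ _ hlt]
  have h1 := Int.emod_nonneg (i + plus - low_limit) (b := high_limit - low_limit) (by omega)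
  have h2 := Int.emod_lt_of_pos (i + plus - low_limit) (b := high_limit - low_limit) (by omega)
  omega

-- ===== VERDICT (by name: the statement is the Claim_ definition above) =====
theorem wrap_add_spec : Claim_unchanged_wrap_add := by
  intro i plus high_limit low_limit _ hpre hnd
  unfold Pre_wrap_add at hpre
  unfold D_wrap_add at hnd
  unfold wrap_add
  rw [wrap_add_alt_emod _ _ _ _ hpre]
  split_ifs with h
  · exact wrapDownLoop_eq _ _ hpre _ (by omega)
  · exact wrapUpLoop_eq _ _ hpre _ (by omega)

theorem wrap_add_changed : Claim_changed_wrap_add := by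
  unfold Claim_changed_wrap_add
  refine ⟨by decide, by decide, by decide, ?_, by decide, by decide⟩
  show wrap_add 0 0 3 1 = 0
  unfold wrap_add
  rw [if_pos (by decide), wrapDownLoop, if_neg (by decide)]
  norm_num

theorem wrap_add_tight : Claim_exact_wrap_add := by
  intro i plus high_limit low_limit _ hpre hd
  unfold Pre_wrap_add at hpre
  have hmem := wrap_add_alt_mem i plus high_limit low_limit hpre
  unfold wrap_add
  rcases hd with ⟨hp, hlo⟩ | ⟨hp, hhi⟩
  · simp only [hp, if_pos]
    rw [wrapDownLoop]
    rw [if_neg (by omega)]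
    omega
  · rw [if_neg (by omega)]
    rw [wrapUpLoop]
    rw [if_neg (by omega)]
    omega
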